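-- pv_equiv track=rewrite | github.com/anhnt-24/AiPuzzle | heuristic.py | linear_conflict
-- ===== SOURCE A (Python) =====
-- def manhattan(state):
--     distance = 0
--     size = len(state)
--     for i in range(size):
--         for j in range(size):
--             val = state[i][j]
--             if val is None:
--                 continue
--             gi, gj = divmod(val - 1, size)
--             distance += abs(gi - i) + abs(gj - j)
--     return distance
--
-- def linear_conflict(state):
--     """Heuristic: Manhattan + xung đột tuyến tính (Linear Conflict)."""
--     size = len(state)
--     manh = manhattan(state)
--     conflict = 0
--
--     # Xung đột theo hàng
--     for i in range(size):
--         current_row = state[i]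
--         for j in range(size):
--             for k in range(j + 1, size):
--                 a, b = current_row[j], current_row[k]
--                 if (
--                     a is not None and b is not None
--                     and (a - 1) // size == i and (b - 1) // size == i
--                     and a > b
--                 ):
--                     conflict += 1
--
--     # Xung đột theo cột
--     for j in range(size):
--         col = [state[i][j] for i in range(size)]
--         for i in range(size):
--             for k in range(i + 1, size):
--                 a, b = col[i], col[k]
--                 if (
--                     a is not None and b is not None
--                     and (a - 1) % size == j and (b - 1) % size == j
--                     and a > b
--                 ):
--                     conflict += 1
--
--     return manh + 2 * conflict
-- ===== SOURCE B (Python) =====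
-- def _sort_count(xs):
--     """Merge sort that also counts inversions (pairs earlier > later)."""
--     n = len(xs)
--     if n < 2:
--         return xs, 0
--     mid = n // 2
--     left, cl = _sort_count(xs[:mid])
--     right, cr = _sort_count(xs[mid:])
--     merged = []
--     inv = cl + cr
--     i = j = 0
--     while i < len(left) and j < len(right):
--         if left[i] <= right[j]:
--             merged.append(left[i])
--             i += 1
--         else:
--             inv += len(left) - i
--             merged.append(right[j])
--             j += 1
--     merged.extend(left[i:])
--     merged.extend(right[j:])
--     return merged, inv
--
--
-- def linear_conflict(state):
--     """Heuristic: Manhattan + linear conflict, via one fused pass plus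
--     merge-sort inversion counting per row/column."""
--     size = len(state)
--     total = 0
--     conflict = 0
--     for i, row in enumerate(state):
--         vals = []
--         for j in range(size):
--             v = row[j]
--             if v is None:
--                 continue
--             gi, gj = divmod(v - 1, size)
--             total += abs(gi - i) + abs(gj - j)
--             if gi == i:
--                 vals.append(v)
--         conflict += _sort_count(vals)[1]
--     for j in range(size):
--         vals = []
--         for i in range(size):
--             v = state[i][j]
--             if v is not None and (v - 1) % size == j:
--                 vals.append(v)
--         conflict += _sort_count(vals)[1]
--     return total + 2 * conflict
-- ===== Notes on version B (the rewrite author's own statement) =====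
-- stated objective: faster
-- what changed: Replaces A's separate Manhattan pass plus all-pairs O(size^3) row/column conflict scans with a single fused pass that collects each row's/column's same-line goal values and counts their inversions by merge-sort inversion counting.
import Mathlib
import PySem

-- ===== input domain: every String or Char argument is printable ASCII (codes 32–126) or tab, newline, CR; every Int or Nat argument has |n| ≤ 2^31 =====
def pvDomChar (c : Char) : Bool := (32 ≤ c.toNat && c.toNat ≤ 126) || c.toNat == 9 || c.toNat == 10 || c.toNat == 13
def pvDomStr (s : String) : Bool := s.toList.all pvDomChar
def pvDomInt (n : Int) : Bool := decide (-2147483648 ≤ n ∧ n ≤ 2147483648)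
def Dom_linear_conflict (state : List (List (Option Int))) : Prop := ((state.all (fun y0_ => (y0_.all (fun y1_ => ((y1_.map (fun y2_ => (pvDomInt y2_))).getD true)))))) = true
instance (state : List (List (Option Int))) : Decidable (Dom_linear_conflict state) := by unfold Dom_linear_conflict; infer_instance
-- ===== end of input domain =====

-- B replaces A's all-pairs row/column conflict scans (O(size^3)) by merge-sort
-- inversion counting on the filtered row/column values, fused with the Manhattan
-- pass (objective: faster).

-- ===== PORT A =====
def pyManhattan (state : List (List (Option Int))) : Int :=
  let size : Int := state.length
  (PySem.List.pyRange 0 size 1).foldl (fun distance i =>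
    (PySem.List.pyRange 0 size 1).foldl (fun distance j =>
      match PySem.List.pyGetD (PySem.List.pyGetD state i []) j none with
      | none => distance
      | some val =>
        let gi := PySem.Int.floordiv (val - 1) size
        let gj := PySem.Int.mod (val - 1) size
        distance + |gi - i| + |gj - j|) distance) 0

def linear_conflict (state : List (List (Option Int))) : Int :=
  let size : Int := state.length
  let manh := pyManhattan state
  let conflict1 :=
    (PySem.List.pyRange 0 size 1).foldl (fun conflict i =>
      let current_row := PySem.List.pyGetD state i []
      (PySem.List.pyRange 0 size 1).foldl (fun conflict j =>
        (PySem.List.pyRange (j + 1) size 1).foldl (fun conflict k =>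
          match PySem.List.pyGetD current_row j none, PySem.List.pyGetD current_row k none with
          | some av, some bv =>
            if PySem.Int.floordiv (av - 1) size = i ∧ PySem.Int.floordiv (bv - 1) size = i ∧ bv < av
            then conflict + 1 else conflict
          | _, _ => conflict) conflict) conflict) 0
  let conflict2 :=
    (PySem.List.pyRange 0 size 1).foldl (fun conflict j =>
      let col := (PySem.List.pyRange 0 size 1).map (fun i =>
        PySem.List.pyGetD (PySem.List.pyGetD state i []) j none)
      (PySem.List.pyRange 0 size 1).foldl (fun conflict i =>
        (PySem.List.pyRange (i + 1) size 1).foldl (fun conflict k =>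
          match PySem.List.pyGetD col i none, PySem.List.pyGetD col k none with
          | some av, some bv =>
            if PySem.Int.mod (av - 1) size = j ∧ PySem.Int.mod (bv - 1) size = j ∧ bv < av
            then conflict + 1 else conflict
          | _, _ => conflict) conflict) conflict) conflict1
  manh + 2 * conflict2

-- ===== PORT B =====
-- merge step of Source B's _sort_count (the index-based while loop, as the obvious
-- structural recursion on the two lists)
def mergeCountAlt : List Int → List Int → List Int × Int
  | [], right => (right, 0)
  | left, [] => (left, 0)
  | x :: l, y :: r =>
    if x ≤ y then
      let m := mergeCountAlt l (y :: r)
      (x :: m.1, m.2)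
    else
      let m := mergeCountAlt (x :: l) r
      (y :: m.1, m.2 + ((l.length : Int) + 1))

-- Source B's _sort_count
def sortCountAlt (xs : List Int) : List Int × Int :=
  if _h : xs.length < 2 then (xs, 0)
  else
    let mid := xs.length / 2
    let L := sortCountAlt (xs.take mid)
    let R := sortCountAlt (xs.drop mid)
    let m := mergeCountAlt L.1 R.1
    (m.1, L.2 + R.2 + m.2)
termination_by xs.length
decreasing_by
  · simp only [List.length_take]; omega
  · simp only [List.length_drop]; omega

def linear_conflict_alt (state : List (List (Option Int))) : Int :=
  let size : Int := state.length
  let tc :=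
    (PySem.List.enumerate state).foldl (fun (tc : Int × Int) p =>
      let i := p.1
      let row := p.2
      let tv :=
        (PySem.List.pyRange 0 size 1).foldl (fun (tv : Int × List Int) j =>
          match PySem.List.pyGetD row j none with
          | none => tv
          | some v =>
            let gi := PySem.Int.floordiv (v - 1) size
            let gj := PySem.Int.mod (v - 1) size
            let t := tv.1 + |gi - i| + |gj - j|
            if gi = i then (t, tv.2 ++ [v]) else (t, tv.2)) (tc.1, ([] : List Int))
      (tv.1, tc.2 + (sortCountAlt tv.2).2)) ((0 : Int), (0 : Int))
  let conflict :=
    (PySem.List.pyRange 0 size 1).foldl (fun conf j =>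
      let vals :=
        (PySem.List.pyRange 0 size 1).foldl (fun (vals : List Int) i =>
          match PySem.List.pyGetD (PySem.List.pyGetD state i []) j none with
          | none => vals
          | some v => if PySem.Int.mod (v - 1) size = j then vals ++ [v] else vals) []
      conf + (sortCountAlt vals).2) tc.2
  tc.1 + 2 * conflict

-- ===== PRECONDITION & SPEC =====
-- Pre_ excludes exactly the inputs where A raises IndexError: some row shorter
-- than the number of rows (state[i][j] for j < len(state) is then out of range).
def Pre_linear_conflict (state : List (List (Option Int))) : Prop :=
  ∀ row ∈ state, state.length ≤ row.length
instance (state : List (List (Option Int))) : Decidable (Pre_linear_conflict state) := by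
  unfold Pre_linear_conflict; infer_instance

def pvWitness_linear_conflict : List (List (Option Int)) :=
  [[some 2, some 1], [none, some 3]]

def Spec_linear_conflict (state : List (List (Option Int))) (out : Int) : Prop := out = linear_conflict_alt state
instance (state : List (List (Option Int))) (out : Int) : Decidable (Spec_linear_conflict state out) := by unfold Spec_linear_conflict; infer_instance

-- ===== CLAIM (what is proved, stated in full; the proofs are below) =====
def Claim_equal_linear_conflict : Prop := ∀ (state : List (List (Option Int))), Dom_linear_conflict state → Pre_linear_conflict state → Spec_linear_conflict state (linear_conflict state)

-- ===== LEMMAS AND PROOFS =====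

-- ---- inversion-count specifications ----

def invN : List Int → Nat
  | [] => 0
  | v :: t => t.countP (fun b => decide (b < v)) + invN t

def crossN (L R : List Int) : Nat :=
  (R.map (fun b => L.countP (fun a => decide (b < a)))).sum

def pcN (q : Option Int → Option Int → Bool) : List (Option Int) → Nat
  | [] => 0
  | x :: t => t.countP (q x) + pcN q t

def keepR (size i : Int) (o : Option Int) : Option Int :=
  match o with
  | none => none
  | some v => if PySem.Int.floordiv (v - 1) size = i then some v else none

def keepC (size j : Int) (o : Option Int) : Option Int :=
  match o with
  | none => none
  | some v => if PySem.Int.mod (v - 1) size = j then some v else none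

def qR (size i : Int) (a b : Option Int) : Bool :=
  match a, b with
  | some av, some bv =>
    decide (PySem.Int.floordiv (av - 1) size = i ∧ PySem.Int.floordiv (bv - 1) size = i ∧ bv < av)
  | _, _ => false

def qC (size j : Int) (a b : Option Int) : Bool :=
  match a, b with
  | some av, some bv =>
    decide (PySem.Int.mod (av - 1) size = j ∧ PySem.Int.mod (bv - 1) size = j ∧ bv < av)
  | _, _ => false

def mhTerm (size i j : Int) (o : Option Int) : Int :=
  match o with
  | none => 0
  | some v => |PySem.Int.floordiv (v - 1) size - i| + |PySem.Int.mod (v - 1) size - j|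

def rowTotal (size i : Int) (row : List (Option Int)) : Int :=
  ((PySem.List.enumerate row 0).map (fun q => mhTerm size i q.1 q.2)).sum

def rowVals (size i : Int) (n : Nat) (row : List (Option Int)) : List Int :=
  (row.take n).filterMap (keepR size i)

def colListOf (state : List (List (Option Int))) (j : Int) : List (Option Int) :=
  (PySem.List.pyRange 0 (state.length : Int) 1).map (fun i =>
    PySem.List.pyGetD (PySem.List.pyGetD state i []) j none)

def colValsOf (state : List (List (Option Int))) (j : Int) : List Int :=
  (colListOf state j).filterMap (keepC (state.length : Int) j)

def commonVal (state : List (List (Option Int))) : Int :=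
  let n := state.length
  let size : Int := (n : Int)
  ((PySem.List.enumerate state).map (fun p => rowTotal size p.1 (p.2.take n))).sum
  + 2 * (((PySem.List.enumerate state).map (fun p => (invN (rowVals size p.1 n p.2) : Int))).sum
         + ((PySem.List.pyRange 0 size 1).map (fun j => (invN (colValsOf state j) : Int))).sum)

-- ---- merge sort counts inversions ----

lemma crossN_nil_left (R : List Int) : crossN [] R = 0 := by
  simp [crossN]

lemma crossN_cons_right (L : List Int) (y : Int) (r : List Int) :
    crossN L (y :: r) = L.countP (fun a => decide (y < a)) + crossN L r := by
  simp [crossN]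

lemma crossN_cons_left (x : Int) (L R : List Int) :
    crossN (x :: L) R = R.countP (fun b => decide (b < x)) + crossN L R := by
  induction R with
  | nil => simp [crossN]
  | cons y r ih =>
    rw [crossN_cons_right, crossN_cons_right, ih, List.countP_cons, List.countP_cons]
    by_cases h : y < x <;> simp [h] <;> omega

lemma invN_append (L R : List Int) : invN (L ++ R) = invN L + invN R + crossN L R := by
  induction L with
  | nil => simp [invN, crossN_nil_left]
  | cons x L ih =>
    simp only [List.cons_append, invN, List.countP_append, ih, crossN_cons_left]
    omega

lemma crossN_perm_left {L L' : List Int} (h : L.Perm L') (R : List Int) :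
    crossN L R = crossN L' R := by
  unfold crossN
  exact congrArg List.sum (List.map_congr_left (fun b _ => h.countP_eq _))

lemma crossN_perm_right (L : List Int) {R R' : List Int} (h : R.Perm R') :
    crossN L R = crossN L R' := (h.map _).sum_eq

lemma mergeCount_perm (L R : List Int) : (mergeCountAlt L R).1.Perm (L ++ R) := by
  fun_induction mergeCountAlt L R with
  | case1 r => simp
  | case2 l => simp
  | case3 x l y r h m ih => exact ih.cons x
  | case4 x l y r h m ih =>
    exact ((ih.cons y).trans (List.perm_middle).symm)

lemma mergeCount_sorted (L R : List Int) (hL : L.Pairwise (· ≤ ·)) (hR : R.Pairwise (· ≤ ·)) :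
    (mergeCountAlt L R).1.Pairwise (· ≤ ·) := by
  fun_induction mergeCountAlt L R with
  | case1 r => exact hR
  | case2 l => exact hL
  | case3 x l y r h m ih =>
    obtain ⟨hLx, hLt⟩ := List.pairwise_cons.1 hL
    refine List.Pairwise.cons ?_ (ih hLt hR)
    intro b hb
    have hb' : b ∈ l ++ y :: r := (mergeCount_perm l (y :: r)).subset hb
    rcases List.mem_append.1 hb' with h1 | h1
    · exact hLx b h1
    · rcases List.mem_cons.1 h1 with rfl | h2
      · exact h
      · exact le_trans h ((List.pairwise_cons.1 hR).1 b h2)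
  | case4 x l y r h m ih =>
    rw [not_le] at h
    obtain ⟨hRy, hRt⟩ := List.pairwise_cons.1 hR
    refine List.Pairwise.cons ?_ (ih hL hRt)
    intro b hb
    have hb' : b ∈ (x :: l) ++ r := (mergeCount_perm (x :: l) r).subset hb
    rcases List.mem_append.1 hb' with h1 | h1
    · rcases List.mem_cons.1 h1 with rfl | h2
      · exact le_of_lt h
      · exact le_trans (le_of_lt h) ((List.pairwise_cons.1 hL).1 b h2)
    · exact hRy b h1

lemma mergeCount_count (L R : List Int) (hL : L.Pairwise (· ≤ ·)) (hR : R.Pairwise (· ≤ ·)) :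
    (mergeCountAlt L R).2 = (crossN L R : Int) := by
  fun_induction mergeCountAlt L R with
  | case1 r => simp [crossN_nil_left]
  | case2 l =>
    cases l with
    | nil => simp [crossN]
    | cons a t => simp [crossN]
  | case3 x l y r h m ih =>
    rw [ih (List.pairwise_cons.1 hL).2 hR]
    have : crossN (x :: l) (y :: r) = crossN l (y :: r) := by
      unfold crossN
      refine congrArg List.sum (List.map_congr_left ?_)
      intro b hb
      have hyb : y ≤ b := by
        rcases List.mem_cons.1 hb with rfl | h2
        · exact le_refl _
        · exact (List.pairwise_cons.1 hR).1 b h2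
      rw [List.countP_cons]
      have : ¬ (b < x) := by omega
      simp [this]
    rw [this]
  | case4 x l y r h m ih =>
    rw [not_le] at h
    rw [ih hL (List.pairwise_cons.1 hR).2, crossN_cons_right]
    have hcnt : (x :: l).countP (fun a => decide (y < a)) = l.length + 1 := by
      have : (x :: l).countP (fun a => decide (y < a)) = (x :: l).length := by
        rw [List.countP_eq_length]
        intro a ha
        rcases List.mem_cons.1 ha with rfl | h2
        · simp [h]
        · have := (List.pairwise_cons.1 hL).1 a h2
          simp; omega
      simpa using this
    rw [hcnt]
    push_cast
    ring

lemma sortCount_spec (xs : List Int) :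
    (sortCountAlt xs).1.Perm xs ∧ (sortCountAlt xs).1.Pairwise (· ≤ ·) ∧
      (sortCountAlt xs).2 = (invN xs : Int) := by
  fun_induction sortCountAlt xs with
  | case1 xs h =>
    match xs, h with
    | [], _ => exact ⟨List.Perm.refl _, by simp, by simp [invN]⟩
    | [x], _ => exact ⟨List.Perm.refl _, by simp, by simp [invN]⟩
  | case2 xs h mid L R m ihL ihR =>
    obtain ⟨Lp, Ls, Lc⟩ := ihL
    obtain ⟨Rp, Rs, Rc⟩ := ihR
    have hperm : m.1.Perm xs := by
      have h1 : m.1.Perm (L.1 ++ R.1) := mergeCount_perm _ _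
      have h2 : (L.1 ++ R.1).Perm (xs.take mid ++ xs.drop mid) := Lp.append Rp
      simpa [List.take_append_drop] using h1.trans h2
    refine ⟨hperm, mergeCount_sorted _ _ Ls Rs, ?_⟩
    have hm2 : m.2 = (crossN L.1 R.1 : Int) := mergeCount_count _ _ Ls Rs
    have hcross : crossN L.1 R.1 = crossN (xs.take mid) (xs.drop mid) := by
      rw [crossN_perm_left Lp, crossN_perm_right _ Rp]
    have hinv : invN xs = invN (xs.take mid) + invN (xs.drop mid) + crossN (xs.take mid) (xs.drop mid) := by
      conv_lhs => rw [← List.take_append_drop mid xs]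
      exact invN_append _ _
    rw [hm2, hcross, Lc, Rc, hinv]
    push_cast
    ring

lemma sortCount_snd (xs : List Int) : (sortCountAlt xs).2 = (invN xs : Int) :=
  (sortCount_spec xs).2.2

-- ---- loop bridges: pyRange/pyGetD folds as structural folds ----

lemma drop_eq_map_range {α : Type} (l : List α) (d : α) (a : Nat) (_h : a ≤ l.length) :
    l.drop a = (List.range (l.length - a)).map (fun k => l.getD (a + k) d) := by
  apply List.ext_getElem
  · simp
  · intro k h1 h2
    simp only [List.getElem_drop, List.getElem_map, List.getElem_range]
    rw [List.getD_eq_getElem]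

lemma foldl_pyRange_getD_elem {α β : Type} (l : List α) (d : α) (G : β → α → β)
    (a : Nat) (h : a ≤ l.length) (init : β) :
    (PySem.List.pyRange (a : Int) (l.length : Int) 1).foldl
        (fun acc k => G acc (PySem.List.pyGetD l k d)) init
      = (l.drop a).foldl G init := by
  rw [PySem.List.pyRange_one, List.foldl_map, drop_eq_map_range l d a h, List.foldl_map]
  have hlen : ((l.length : Int) - (a : Int)).toNat = l.length - a := by omega
  rw [hlen]
  apply PySem.List.foldl_congr_mem
  intro acc k hk
  have hk' : k < l.length - a := List.mem_range.1 hk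
  have : ((a : Int) + (k : Int)) = ((a + k : Nat) : Int) := by push_cast; ring
  rw [this, PySem.List.pyGetD_natCast]

lemma foldl_pyRange_getD_enum' {α β : Type} (d : α) (F : β → Int → α → β) :
    ∀ (t : List α) (pre : List α) (init : β),
    (PySem.List.pyRange (pre.length : Int) ((pre.length + t.length : Nat) : Int) 1).foldl
        (fun acc j => F acc j (PySem.List.pyGetD (pre ++ t) j d)) init
      = (PySem.List.enumerate t (pre.length : Int)).foldl (fun acc p => F acc p.1 p.2) init := by
  intro t
  induction t with
  | nil =>
    intro pre init
    rw [PySem.List.pyRange_one_eq_nil (by simp)]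
    simp [PySem.List.enumerate]
  | cons x t ih =>
    intro pre init
    have hlt : (pre.length : Int) < ((pre.length + (x :: t).length : Nat) : Int) := by
      push_cast [List.length_cons]; omega
    rw [PySem.List.pyRange_one_cons hlt, List.foldl_cons]
    have hget : PySem.List.pyGetD (pre ++ x :: t) (pre.length : Int) d = x := by
      rw [PySem.List.pyGetD_natCast]
      simp [List.getD_eq_getElem?_getD]
    rw [hget]
    have hlist : pre ++ x :: t = (pre ++ [x]) ++ t := by simp
    have h1 : ((pre.length : Int) + 1) = (((pre ++ [x]).length : Nat) : Int) := by
      push_cast [List.length_append, List.length_cons, List.length_nil]; omega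
    have h2 : ((pre.length + (x :: t).length : Nat) : Int)
        = (((pre ++ [x]).length + t.length : Nat) : Int) := by
      push_cast [List.length_append, List.length_cons, List.length_nil]; omega
    rw [hlist, h1, h2, ih (pre ++ [x]) (F init (pre.length : Int) x)]
    have henum : PySem.List.enumerate (x :: t) (pre.length : Int)
        = ((pre.length : Int), x) :: PySem.List.enumerate t ((pre.length : Int) + 1) := rfl
    rw [henum, List.foldl_cons, h1]

lemma pyGetD_take {α : Type} (l : List α) (d : α) (n : Nat) (j : Int)
    (h0 : 0 ≤ j) (hj : j < (n : Int)) :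
    PySem.List.pyGetD (l.take n) j d = PySem.List.pyGetD l j d := by
  obtain ⟨k, rfl⟩ : ∃ k : Nat, j = (k : Int) := ⟨j.toNat, (Int.toNat_of_nonneg h0).symm⟩
  have hk : k < n := by exact_mod_cast hj
  rw [PySem.List.pyGetD_natCast, PySem.List.pyGetD_natCast]
  simp [List.getD_eq_getElem?_getD, hk]

lemma foldl_pyRange_getD_take {α β : Type} (l : List α) (d : α) (n : Nat)
    (h : n ≤ l.length) (F : β → Int → α → β) (init : β) :
    (PySem.List.pyRange 0 (n : Int) 1).foldl
        (fun acc j => F acc j (PySem.List.pyGetD l j d)) init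
      = (PySem.List.enumerate (l.take n) 0).foldl (fun acc p => F acc p.1 p.2) init := by
  have hlen : (l.take n).length = n := by simp; omega
  have step1 : (PySem.List.pyRange 0 (n : Int) 1).foldl
      (fun acc j => F acc j (PySem.List.pyGetD l j d)) init
      = (PySem.List.pyRange 0 (n : Int) 1).foldl
      (fun acc j => F acc j (PySem.List.pyGetD (l.take n) j d)) init := by
    apply PySem.List.foldl_congr_mem
    intro acc j hj
    rw [PySem.List.mem_pyRange_one] at hj
    rw [pyGetD_take l d n j hj.1 hj.2]
  rw [step1]
  have := foldl_pyRange_getD_enum' d F (l.take n) [] init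
  simpa [hlen] using this

lemma enum_foldl_snd {α β : Type} (l : List α) (G : β → α → β) :
    ∀ (s : Int) (init : β),
    (PySem.List.enumerate l s).foldl (fun acc p => G acc p.2) init = l.foldl G init := by
  induction l with
  | nil => intro s init; rfl
  | cons x t ih => intro s init; exact ih (s + 1) (G init x)

lemma snd_mem_of_mem_enumerate {α : Type} (l : List α) :
    ∀ (s : Int) (p : Int × α), p ∈ PySem.List.enumerate l s → p.2 ∈ l := by
  induction l with
  | nil => intro s p hp; cases hp
  | cons x t ih =>
    intro s p hp
    rcases List.mem_cons.1 hp with rfl | h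
    · simp
    · exact List.mem_cons_of_mem _ (ih (s + 1) p h)

lemma foldl_optAppend (keep : Option Int → Option Int) (l : List (Option Int)) :
    ∀ init : List Int,
    l.foldl (fun vals o => vals ++ (keep o).toList) init = init ++ l.filterMap keep := by
  induction l with
  | nil => intro init; simp
  | cons o t ih =>
    intro init
    cases ho : keep o <;> simp [ho, ih]

-- ---- the all-pairs double loop counts pcN; pcN is invN of the filtered list ----

lemma pc_sum (q : Option Int → Option Int → Bool) (l : List (Option Int)) :
    ((List.range l.length).map
        (fun k => (l.drop (k + 1)).countP (q (l.getD k none)))).sum = pcN q l := by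
  induction l with
  | nil => simp [pcN]
  | cons x t ih =>
    rw [List.length_cons, List.range_succ_eq_map]
    simp only [List.map_cons, List.map_map, List.sum_cons]
    have hrest : ((List.range t.length).map
        ((fun k => ((x :: t).drop (k + 1)).countP (q ((x :: t).getD k none))) ∘ (· + 1))).sum
        = ((List.range t.length).map
        (fun k => (t.drop (k + 1)).countP (q (t.getD k none)))).sum := by
      refine congrArg List.sum (List.map_congr_left ?_)
      intro k _
      simp [List.drop_succ_cons]
    rw [hrest, ih]
    simp [pcN]

lemma pairloop_core (l : List (Option Int)) (q : Option Int → Option Int → Bool)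
    (conf : Int) :
    (PySem.List.pyRange 0 (l.length : Int) 1).foldl (fun conf j =>
        (PySem.List.pyRange (j + 1) (l.length : Int) 1).foldl (fun c k =>
          if q (PySem.List.pyGetD l j none) (PySem.List.pyGetD l k none) then c + 1 else c) conf)
      conf
    = conf + (pcN q l : Int) := by
  rw [PySem.List.pyRange_zero_nat, List.foldl_map]
  have step : ∀ (c : Int) (k : Nat), k ∈ List.range l.length →
      (PySem.List.pyRange ((k : Int) + 1) (l.length : Int) 1).foldl (fun c k' =>
          if q (PySem.List.pyGetD l (k : Int) none) (PySem.List.pyGetD l k' none) then c + 1 else c) c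
      = c + ((l.drop (k + 1)).countP (q (l.getD k none)) : Int) := by
    intro c k hk
    have hk' : k < l.length := List.mem_range.1 hk
    have hcast : ((k : Int) + 1) = ((k + 1 : Nat) : Int) := by push_cast; ring
    rw [hcast, foldl_pyRange_getD_elem l none
      (fun c o => if q (PySem.List.pyGetD l (k : Int) none) o then c + 1 else c)
      (k + 1) (by omega) c]
    rw [PySem.List.foldl_ite_add_one
      (fun o => q (PySem.List.pyGetD l (k : Int) none) o = true)]
    rw [PySem.List.pyGetD_natCast]
    simp
  rw [PySem.List.foldl_congr_mem _ _
    (fun c k => c + ((l.drop (k + 1)).countP (q (l.getD k none)) : Int)) conf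
    (fun c k hk => step c k hk)]
  rw [PySem.List.foldl_add]
  congr 1
  rw [← pc_sum q l, Nat.cast_list_sum, List.map_map]
  rfl

lemma pairloop (l : List (Option Int)) (n : Nat) (h : n ≤ l.length)
    (q : Option Int → Option Int → Bool) (conf : Int) :
    (PySem.List.pyRange 0 (n : Int) 1).foldl (fun conf j =>
        (PySem.List.pyRange (j + 1) (n : Int) 1).foldl (fun c k =>
          if q (PySem.List.pyGetD l j none) (PySem.List.pyGetD l k none) then c + 1 else c) conf)
      conf
    = conf + (pcN q (l.take n) : Int) := by
  have hlen : (l.take n).length = n := by simp; omega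
  have step : ∀ (c : Int) (j : Int), j ∈ PySem.List.pyRange 0 (n : Int) 1 →
      (PySem.List.pyRange (j + 1) (n : Int) 1).foldl (fun c k =>
          if q (PySem.List.pyGetD l j none) (PySem.List.pyGetD l k none) then c + 1 else c) c
      = (PySem.List.pyRange (j + 1) (n : Int) 1).foldl (fun c k =>
          if q (PySem.List.pyGetD (l.take n) j none) (PySem.List.pyGetD (l.take n) k none)
          then c + 1 else c) c := by
    intro c j hj
    rw [PySem.List.mem_pyRange_one] at hj
    rw [pyGetD_take l none n j hj.1 hj.2]
    apply PySem.List.foldl_congr_mem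
    intro acc k hk
    rw [PySem.List.mem_pyRange_one] at hk
    rw [pyGetD_take l none n k (by omega) hk.2]
  rw [PySem.List.foldl_congr_mem _ _ _ conf step]
  have := pairloop_core (l.take n) q conf
  rw [hlen] at this
  exact this

lemma pcN_eq_invN (q : Option Int → Option Int → Bool) (keep : Option Int → Option Int)
    (hq : ∀ a b, q a b = true ↔ ∃ va vb, keep a = some va ∧ keep b = some vb ∧ vb < va)
    (l : List (Option Int)) :
    pcN q l = invN (l.filterMap keep) := by
  induction l with
  | nil => simp [pcN, invN]
  | cons o t ih =>
    cases ho : keep o with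
    | none =>
      have hzero : t.countP (q o) = 0 := by
        rw [List.countP_eq_zero]
        intro b _hb hqb
        obtain ⟨va, vb, hva, _, _⟩ := (hq o b).1 hqb
        rw [ho] at hva; cases hva
      simp [pcN, ho, hzero, ih]
    | some v =>
      have hcnt : t.countP (q o)
          = t.countP (fun a => ((keep a).map (fun b => decide (b < v))).getD false) := by
        apply List.countP_congr
        intro b _
        cases hb : keep b with
        | none =>
          simp only [Option.map_none, Option.getD_none]
          constructor
          · intro hqb
            obtain ⟨va, vb, hva, hvb, _⟩ := (hq o b).1 hqb
            rw [hb] at hvb; cases hvb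
          · intro hfalse; cases hfalse
        | some vb =>
          simp only [Option.map_some, Option.getD_some]
          constructor
          · intro hqb
            obtain ⟨va, vb', hva, hvb', hlt⟩ := (hq o b).1 hqb
            rw [ho] at hva; injection hva with hva
            rw [hb] at hvb'; injection hvb' with hvb'
            subst hva; subst hvb'
            simpa using hlt
          · intro hdec
            exact (hq o b).2 ⟨v, vb, ho, hb, by simpa using hdec⟩
      simp only [pcN, List.filterMap_cons, ho, invN, ih, hcnt, List.countP_filterMap]

lemma qR_keepR (size i : Int) : ∀ a b, qR size i a b = true ↔
    ∃ va vb, keepR size i a = some va ∧ keepR size i b = some vb ∧ vb < va := by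
  intro a b
  cases a with
  | none => simp [qR, keepR]
  | some av =>
    cases b with
    | none => simp [qR, keepR]
    | some bv =>
      simp only [qR, keepR, decide_eq_true_eq]
      constructor
      · rintro ⟨h1, h2, h3⟩
        exact ⟨av, bv, by simp [h1], by simp [h2], h3⟩
      · rintro ⟨va, vb, hva, hvb, hlt⟩
        split_ifs at hva hvb with g1 g2
        · injection hva with hva; injection hvb with hvb
          subst hva; subst hvb
          exact ⟨g1, g2, hlt⟩

lemma qC_keepC (size j : Int) : ∀ a b, qC size j a b = true ↔
    ∃ va vb, keepC size j a = some va ∧ keepC size j b = some vb ∧ vb < va := by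
  intro a b
  cases a with
  | none => simp [qC, keepC]
  | some av =>
    cases b with
    | none => simp [qC, keepC]
    | some bv =>
      simp only [qC, keepC, decide_eq_true_eq]
      constructor
      · rintro ⟨h1, h2, h3⟩
        exact ⟨av, bv, by simp [h1], by simp [h2], h3⟩
      · rintro ⟨va, vb, hva, hvb, hlt⟩
        split_ifs at hva hvb with g1 g2
        · injection hva with hva; injection hvb with hvb
          subst hva; subst hvb
          exact ⟨g1, g2, hlt⟩

-- ---- A equals the common value ----

lemma rowTotal_loop (n : Nat) (i : Int) (row : List (Option Int)) (h : n ≤ row.length)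
    (acc : Int) :
    (PySem.List.pyRange 0 (n : Int) 1).foldl (fun distance j =>
        match PySem.List.pyGetD row j none with
        | none => distance
        | some val => distance + |PySem.Int.floordiv (val - 1) (n : Int) - i|
            + |PySem.Int.mod (val - 1) (n : Int) - j|) acc
      = acc + rowTotal (n : Int) i (row.take n) := by
  rw [foldl_pyRange_getD_take row none n h
    (fun distance j o =>
      match o with
      | none => distance
      | some val => distance + |PySem.Int.floordiv (val - 1) (n : Int) - i|
          + |PySem.Int.mod (val - 1) (n : Int) - j|) acc]
  rw [PySem.List.foldl_congr_mem _ _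
    (fun acc q => acc + mhTerm (n : Int) i q.1 q.2) acc ?_]
  · rw [PySem.List.foldl_add]
    rfl
  · rintro acc ⟨j, o⟩ _
    cases o with
    | none => simp [mhTerm]
    | some v => simp [mhTerm]; ring

lemma rowPairs_loop (n : Nat) (i : Int) (row : List (Option Int)) (h : n ≤ row.length)
    (conf : Int) :
    (PySem.List.pyRange 0 (n : Int) 1).foldl (fun conflict j =>
        (PySem.List.pyRange (j + 1) (n : Int) 1).foldl (fun conflict k =>
          match PySem.List.pyGetD row j none, PySem.List.pyGetD row k none with
          | some av, some bv =>
            if PySem.Int.floordiv (av - 1) (n : Int) = i ∧ PySem.Int.floordiv (bv - 1) (n : Int) = i ∧ bv < av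
            then conflict + 1 else conflict
          | _, _ => conflict) conflict) conf
      = conf + (invN (rowVals (n : Int) i n row) : Int) := by
  have hmatch : ∀ (c : Int) (j : Int), j ∈ PySem.List.pyRange 0 (n : Int) 1 →
      (PySem.List.pyRange (j + 1) (n : Int) 1).foldl (fun conflict k =>
          match PySem.List.pyGetD row j none, PySem.List.pyGetD row k none with
          | some av, some bv =>
            if PySem.Int.floordiv (av - 1) (n : Int) = i ∧ PySem.Int.floordiv (bv - 1) (n : Int) = i ∧ bv < av
            then conflict + 1 else conflict
          | _, _ => conflict) c
      = (PySem.List.pyRange (j + 1) (n : Int) 1).foldl (fun conflict k =>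
          if qR (n : Int) i (PySem.List.pyGetD row j none) (PySem.List.pyGetD row k none)
          then conflict + 1 else conflict) c := by
    intro c j _
    apply PySem.List.foldl_congr_mem
    intro acc k _
    cases PySem.List.pyGetD row j none <;> cases PySem.List.pyGetD row k none <;> simp [qR]
  rw [PySem.List.foldl_congr_mem _ _ _ conf hmatch, pairloop row n h (qR (n : Int) i) conf,
    pcN_eq_invN (qR (n : Int) i) (keepR (n : Int) i) (qR_keepR (n : Int) i)]
  rfl

lemma colPairs_loop (n : Nat) (l : List (Option Int)) (h : l.length = n) (j : Int)
    (conf : Int) :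
    (PySem.List.pyRange 0 (n : Int) 1).foldl (fun conflict i =>
        (PySem.List.pyRange (i + 1) (n : Int) 1).foldl (fun conflict k =>
          match PySem.List.pyGetD l i none, PySem.List.pyGetD l k none with
          | some av, some bv =>
            if PySem.Int.mod (av - 1) (n : Int) = j ∧ PySem.Int.mod (bv - 1) (n : Int) = j ∧ bv < av
            then conflict + 1 else conflict
          | _, _ => conflict) conflict) conf
      = conf + (invN (l.filterMap (keepC (n : Int) j)) : Int) := by
  have hmatch : ∀ (c : Int) (i : Int), i ∈ PySem.List.pyRange 0 (n : Int) 1 →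
      (PySem.List.pyRange (i + 1) (n : Int) 1).foldl (fun conflict k =>
          match PySem.List.pyGetD l i none, PySem.List.pyGetD l k none with
          | some av, some bv =>
            if PySem.Int.mod (av - 1) (n : Int) = j ∧ PySem.Int.mod (bv - 1) (n : Int) = j ∧ bv < av
            then conflict + 1 else conflict
          | _, _ => conflict) c
      = (PySem.List.pyRange (i + 1) (n : Int) 1).foldl (fun conflict k =>
          if qC (n : Int) j (PySem.List.pyGetD l i none) (PySem.List.pyGetD l k none)
          then conflict + 1 else conflict) c := by
    intro c i _
    apply PySem.List.foldl_congr_mem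
    intro acc k _
    cases PySem.List.pyGetD l i none <;> cases PySem.List.pyGetD l k none <;> simp [qC]
  rw [PySem.List.foldl_congr_mem _ _ _ conf hmatch, pairloop l n (le_of_eq h.symm) (qC (n : Int) j) conf,
    pcN_eq_invN (qC (n : Int) j) (keepC (n : Int) j) (qC_keepC (n : Int) j),
    List.take_of_length_le (le_of_eq h)]

lemma manhattan_eq (state : List (List (Option Int))) (hpre : Pre_linear_conflict state) :
    pyManhattan state
      = ((PySem.List.enumerate state).map
          (fun p => rowTotal (state.length : Int) p.1 (p.2.take state.length))).sum := by
  simp only [pyManhattan]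
  rw [foldl_pyRange_getD_take state [] state.length le_rfl
    (fun (distance : Int) (i : Int) (row : List (Option Int)) =>
      (PySem.List.pyRange 0 (state.length : Int) 1).foldl (fun distance j =>
        match PySem.List.pyGetD row j none with
        | none => distance
        | some val => distance + |PySem.Int.floordiv (val - 1) (state.length : Int) - i|
            + |PySem.Int.mod (val - 1) (state.length : Int) - j|) distance) 0]
  rw [List.take_length]
  rw [PySem.List.foldl_congr_mem _ _
    (fun (acc : Int) (p : Int × List (Option Int)) =>
      acc + rowTotal (state.length : Int) p.1 (p.2.take state.length)) 0 ?_]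
  · rw [PySem.List.foldl_add]; simp
  · intro acc p hp
    exact rowTotal_loop state.length p.1 p.2 (hpre p.2 (snd_mem_of_mem_enumerate state 0 p hp)) acc

lemma rowPair_loop (n : Nat) (i : Int) (row : List (Option Int)) (h : n ≤ row.length)
    (t0 : Int) :
    (PySem.List.pyRange 0 (n : Int) 1).foldl (fun (tv : Int × List Int) j =>
        match PySem.List.pyGetD row j none with
        | none => tv
        | some v =>
          if PySem.Int.floordiv (v - 1) (n : Int) = i
          then (tv.1 + |PySem.Int.floordiv (v - 1) (n : Int) - i| + |PySem.Int.mod (v - 1) (n : Int) - j|,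
                tv.2 ++ [v])
          else (tv.1 + |PySem.Int.floordiv (v - 1) (n : Int) - i| + |PySem.Int.mod (v - 1) (n : Int) - j|,
                tv.2)) (t0, ([] : List Int))
      = (t0 + rowTotal (n : Int) i (row.take n), rowVals (n : Int) i n row) := by
  rw [foldl_pyRange_getD_take row none n h
    (fun (tv : Int × List Int) j o =>
      match o with
      | none => tv
      | some v =>
        if PySem.Int.floordiv (v - 1) (n : Int) = i
        then (tv.1 + |PySem.Int.floordiv (v - 1) (n : Int) - i| + |PySem.Int.mod (v - 1) (n : Int) - j|,
              tv.2 ++ [v])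
        else (tv.1 + |PySem.Int.floordiv (v - 1) (n : Int) - i| + |PySem.Int.mod (v - 1) (n : Int) - j|,
              tv.2)) (t0, ([] : List Int))]
  rw [PySem.List.foldl_congr_mem _ _
    (fun (tv : Int × List Int) (q : Int × Option Int) =>
      (tv.1 + mhTerm (n : Int) i q.1 q.2, tv.2 ++ (keepR (n : Int) i q.2).toList))
    (t0, ([] : List Int)) ?_]
  · rw [PySem.List.foldl_prod_mk (f := fun (t : Int) (q : Int × Option Int) => t + mhTerm (n : Int) i q.1 q.2)
      (g := fun (vals : List Int) (q : Int × Option Int) => vals ++ (keepR (n : Int) i q.2).toList)]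
    rw [PySem.List.foldl_add]
    rw [enum_foldl_snd (row.take n) (fun vals o => vals ++ (keepR (n : Int) i o).toList) 0
      ([] : List Int)]
    rw [foldl_optAppend (keepR (n : Int) i) (row.take n) []]
    rfl
  · rintro tv ⟨j, o⟩ _
    cases o with
    | none => simp [mhTerm, keepR]
    | some v =>
      by_cases hg : PySem.Int.floordiv (v - 1) (n : Int) = i
      · simp [mhTerm, keepR, hg]
      · simp [mhTerm, keepR, hg]
        ring

lemma colVals_loop (state : List (List (Option Int))) (j : Int) :
    (PySem.List.pyRange 0 (state.length : Int) 1).foldl (fun (vals : List Int) i =>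
        match PySem.List.pyGetD (PySem.List.pyGetD state i []) j none with
        | none => vals
        | some v => if PySem.Int.mod (v - 1) (state.length : Int) = j then vals ++ [v] else vals)
      ([] : List Int)
      = colValsOf state j := by
  rw [← List.foldl_map (f := fun i => PySem.List.pyGetD (PySem.List.pyGetD state i []) j none)
    (g := fun (vals : List Int) o =>
      match o with
      | none => vals
      | some v => if PySem.Int.mod (v - 1) (state.length : Int) = j then vals ++ [v] else vals)]
  rw [PySem.List.foldl_congr_mem _ _
    (fun (vals : List Int) o => vals ++ (keepC (state.length : Int) j o).toList)
    ([] : List Int) ?_]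
  · rw [foldl_optAppend]
    rfl
  · intro vals o _
    cases o with
    | none => simp [keepC]
    | some v =>
      by_cases hg : PySem.Int.mod (v - 1) (state.length : Int) = j <;> simp [keepC, hg]

lemma A_eq (state : List (List (Option Int))) (hpre : Pre_linear_conflict state) :
    linear_conflict state = commonVal state := by
  simp only [linear_conflict]
  rw [manhattan_eq state hpre]
  -- row-conflict loop → sum of per-row inversion counts
  rw [foldl_pyRange_getD_take state [] state.length le_rfl
    (fun (conflict : Int) (i : Int) (row : List (Option Int)) =>
      (PySem.List.pyRange 0 (state.length : Int) 1).foldl (fun conflict j =>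
        (PySem.List.pyRange (j + 1) (state.length : Int) 1).foldl (fun conflict k =>
          match PySem.List.pyGetD row j none, PySem.List.pyGetD row k none with
          | some av, some bv =>
            if PySem.Int.floordiv (av - 1) (state.length : Int) = i ∧
                PySem.Int.floordiv (bv - 1) (state.length : Int) = i ∧ bv < av
            then conflict + 1 else conflict
          | _, _ => conflict) conflict) conflict) 0]
  rw [List.take_length]
  rw [PySem.List.foldl_congr_mem _ _
    (fun (acc : Int) (p : Int × List (Option Int)) =>
      acc + (invN (rowVals (state.length : Int) p.1 state.length p.2) : Int)) 0 ?_]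
  · -- column-conflict loop → sum of per-column inversion counts
    rw [PySem.List.foldl_congr_mem _ _
      (fun (conflict : Int) (j : Int) => conflict + (invN (colValsOf state j) : Int)) _ ?_]
    · rw [PySem.List.foldl_add, PySem.List.foldl_add]
      simp only [commonVal]
      ring
    · intro acc j _
      exact colPairs_loop state.length (colListOf state j)
        (by simp [colListOf, PySem.List.pyRange_one]) j acc
  · intro acc p hp
    exact rowPairs_loop state.length p.1 p.2
      (hpre p.2 (snd_mem_of_mem_enumerate state 0 p hp)) acc

lemma B_eq (state : List (List (Option Int))) (hpre : Pre_linear_conflict state) :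
    linear_conflict_alt state = commonVal state := by
  simp only [linear_conflict_alt]
  rw [PySem.List.foldl_congr_mem _ _
    (fun (tc : Int × Int) (p : Int × List (Option Int)) =>
      (tc.1 + rowTotal (state.length : Int) p.1 (p.2.take state.length),
       tc.2 + (invN (rowVals (state.length : Int) p.1 state.length p.2) : Int)))
    ((0 : Int), (0 : Int)) ?_]
  · rw [PySem.List.foldl_prod_mk
      (f := fun (t : Int) (p : Int × List (Option Int)) =>
        t + rowTotal (state.length : Int) p.1 (p.2.take state.length))
      (g := fun (c : Int) (p : Int × List (Option Int)) =>
        c + (invN (rowVals (state.length : Int) p.1 state.length p.2) : Int))]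
    rw [PySem.List.foldl_add, PySem.List.foldl_add]
    rw [PySem.List.foldl_congr_mem _ _
      (fun (conf : Int) (j : Int) => conf + (invN (colValsOf state j) : Int)) _ ?_]
    · rw [PySem.List.foldl_add]
      simp only [commonVal]
      ring
    · intro acc j _
      rw [colVals_loop state j, sortCount_snd]
  · intro tc p hp
    rw [rowPair_loop state.length p.1 p.2
      (hpre p.2 (snd_mem_of_mem_enumerate state 0 p hp)) tc.1]
    dsimp only
    rw [sortCount_snd]

-- ===== VERDICT (by name: the statement is the Claim_ definition above) =====
theorem linear_conflict_spec : Claim_equal_linear_conflict := by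
  intro state _ hpre
  unfold Spec_linear_conflict
  rw [A_eq state hpre, B_eq state hpre]
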